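-- pv_equiv track=rewrite | github.com/MercyNaima/PythonStudy | MercyStudy/code_convert.py | get_7_from_str
-- ===== SOURCE A (Python) =====
-- def get_7_from_str(_str):
--     _list = []
--     for i in _str:
--         _list.append(i)
--     _count = 0
--     _result = ''
--     _list_len = len(_list)
--     if _list_len < 8:
--         while _count < 7 - _list_len:
--             _list.insert(0, '0')
--             _count += 1
--         for i in _list:
--             _result += i
--         return _result
--     else:
--         while _count < 7:
--             _result += _str[_count]
--             _count += 1
--         return _result
--     pass
-- ===== SOURCE B (Python) =====
-- def get_7_from_str(_str):
--     return ('0' * (7 - len(_str)) + _str)[:7]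
-- ===== Notes on version B (the rewrite author's own statement) =====
-- stated objective: simpler
-- what changed: Replaces the character-copy loop, while-loop zero insertion and concatenation loops with one closed-form expression: left-pad with zeros to width 7 and slice the first 7 characters.
import Mathlib
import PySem

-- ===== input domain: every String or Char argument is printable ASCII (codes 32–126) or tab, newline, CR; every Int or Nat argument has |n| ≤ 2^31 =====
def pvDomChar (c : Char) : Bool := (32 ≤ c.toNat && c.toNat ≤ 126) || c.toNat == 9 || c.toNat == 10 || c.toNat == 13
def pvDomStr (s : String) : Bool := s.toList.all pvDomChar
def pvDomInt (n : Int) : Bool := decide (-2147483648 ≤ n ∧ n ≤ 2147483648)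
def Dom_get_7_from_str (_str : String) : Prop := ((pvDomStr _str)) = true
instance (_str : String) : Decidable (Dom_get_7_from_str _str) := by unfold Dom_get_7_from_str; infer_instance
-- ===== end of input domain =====

-- B replaces A's copy loop, insert-at-front while loop and concatenation loops with one
-- closed-form pad-and-slice expression (objective: simpler).

-- ===== PORT A =====
-- while _count < 7 - _list_len: _list.insert(0, '0'); the iteration count max(7-len,0) is Nat subtraction
def get7PadLoop : Nat → List Char → List Char
  | 0, l => l
  | n + 1, l => get7PadLoop n ('0' :: l)

def get_7_from_str (_str : String) : String :=
  -- for i in _str: _list.append(i)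
  let _list : List Char := _str.toList.foldl (fun acc i => acc ++ [i]) []
  let _list_len : Int := _list.length
  if _list_len < 8 then
    let padded := get7PadLoop (7 - _list.length) _list
    -- for i in _list: _result += i
    String.ofList (padded.foldl (fun acc i => acc ++ [i]) [])
  else
    -- while _count < 7: _result += _str[_count]  (getD default is never hit: len ≥ 8)
    String.ofList ((List.range 7).foldl (fun acc c => acc ++ [_list.getD c ' ']) [])

-- ===== PORT B =====
-- ('0' * (7 - len(_str)) + _str)[:7]; '0'*negative = '' is Nat subtraction's truncation
def get_7_from_str_alt (_str : String) : String :=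
  String.ofList (PySem.List.slice (List.replicate (7 - _str.toList.length) '0' ++ _str.toList) none (some 7))

-- ===== PRECONDITION & SPEC =====
def Spec_get_7_from_str (_str : String) (out : String) : Prop := out = get_7_from_str_alt _str
instance (_str : String) (out : String) : Decidable (Spec_get_7_from_str _str out) := by unfold Spec_get_7_from_str; infer_instance

-- ===== CLAIM (what is proved, stated in full; the proofs are below) =====
def Claim_equal_get_7_from_str : Prop := ∀ (_str : String), Dom_get_7_from_str _str → Spec_get_7_from_str _str (get_7_from_str _str)

-- ===== LEMMAS AND PROOFS =====
theorem foldl_append_id (l init : List Char) :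
    l.foldl (fun acc i => acc ++ [i]) init = init ++ l := by
  induction l generalizing init with
  | nil => simp
  | cons x xs ih => simp [List.foldl, ih]

theorem get7PadLoop_eq (n : Nat) (l : List Char) :
    get7PadLoop n l = List.replicate n '0' ++ l := by
  induction n generalizing l with
  | zero => simp [get7PadLoop]
  | succ k ih => simp [get7PadLoop, ih, List.replicate_succ']

theorem foldl_range_take (l : List Char) (k : Nat) (hk : k ≤ l.length) :
    (List.range k).foldl (fun acc c => acc ++ [l.getD c ' ']) [] = l.take k := by
  induction k with
  | zero => simp
  | succ m ih =>
    rw [List.range_succ, List.foldl_append, ih (by omega)]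
    simp only [List.foldl_cons, List.foldl_nil]
    rw [List.getD_eq_getElem l ' ' (by omega : m < l.length)]
    rw [← List.take_concat_get (by omega : m < l.length), List.concat_eq_append]

theorem get_7_from_str_spec : Claim_equal_get_7_from_str := by
  intro s _
  unfold Spec_get_7_from_str get_7_from_str get_7_from_str_alt
  have hslice : PySem.List.slice (List.replicate (7 - s.toList.length) '0' ++ s.toList) none (some 7)
      = (List.replicate (7 - s.toList.length) '0' ++ s.toList).take 7 := by
    rw [PySem.List.slice_to _ (by norm_num)]; rfl
  simp only [foldl_append_id, List.nil_append, get7PadLoop_eq, hslice]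
  by_cases h : (s.toList.length : Int) < 8
  · rw [if_pos h]
    have hn : s.toList.length ≤ 7 := by omega
    rw [List.take_of_length_le (by rw [List.length_append, List.length_replicate]; omega)]
  · rw [if_neg h]
    have hn : 8 ≤ s.toList.length := by omega
    have h0 : 7 - s.toList.length = 0 := by omega
    rw [h0, foldl_range_take s.toList 7 (by omega)]
    simp
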